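-- pv_equiv track=rewrite | github.com/JianweiQ/Cross-lingual-classification | preprocessing.py | countUniqueWords
-- ===== SOURCE A (Python) =====
-- def countUniqueWords(docs, labels, k, w2v=None):
--     """
--     param:
--         docs: a list of strings
--         labels: a list of k integers (0...k-1), representing k labels/categories.
--             docs and labels should have the same length
--         k: int, the number of categories. k = 4 for reuters dataset
--         w2v: word embedding dictionary, used to count how many words can be found
--     return:
--         nUniqueWords: a list of k numbers, each representing the number
--             of unique words for docs in that category
--     """
--     uniqueWords = [set() for _ in range(k)]
--     for i in range(len(docs)):
--         doc = docs[i]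
--         words = doc.strip().split()
--         for word in words:
--             if w2v:
--                 if word in w2v and word not in uniqueWords[labels[i]]:
--                     uniqueWords[labels[i]].add(word)
--             else:
--                 if word not in uniqueWords[labels[i]]:
--                     uniqueWords[labels[i]].add(word)
--     X_count = []
--     for i in range(k):
--         X_count.append(len(uniqueWords[i]))
--     print ("The number of unique words is:", X_count)
--     return X_count
-- ===== SOURCE B (Python) =====
-- def countUniqueWords(docs, labels, k, w2v=None):
--     counts = [
--         len({w for doc, lab in zip(docs, labels) if lab == c
--                for w in doc.strip().split()
--                if not w2v or w in w2v})
--         for c in range(k)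
--     ]
--     print ("The number of unique words is:", counts)
--     return counts
-- ===== Notes on version B (the rewrite author's own statement) =====
-- stated objective: simpler
-- what changed: B replaces A's single mutating pass that fills k per-category sets in place (then a final len() loop) by k independent staged passes: for each category c it builds the set of surviving words of the docs labelled c with one comprehension and takes its len, with no mutable per-category state; Pre_ restricts to the documented domain (each doc with a word surviving the w2v filter has a label in 0..k-1), excluding inputs where A raises IndexError or silently wraps a negative label onto category k+label.
-- outside the precondition, e.g. on countUniqueWords(['a'], [-1], 2, None): A returns [0, 1], B returns [0, 0]
import Mathlib
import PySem

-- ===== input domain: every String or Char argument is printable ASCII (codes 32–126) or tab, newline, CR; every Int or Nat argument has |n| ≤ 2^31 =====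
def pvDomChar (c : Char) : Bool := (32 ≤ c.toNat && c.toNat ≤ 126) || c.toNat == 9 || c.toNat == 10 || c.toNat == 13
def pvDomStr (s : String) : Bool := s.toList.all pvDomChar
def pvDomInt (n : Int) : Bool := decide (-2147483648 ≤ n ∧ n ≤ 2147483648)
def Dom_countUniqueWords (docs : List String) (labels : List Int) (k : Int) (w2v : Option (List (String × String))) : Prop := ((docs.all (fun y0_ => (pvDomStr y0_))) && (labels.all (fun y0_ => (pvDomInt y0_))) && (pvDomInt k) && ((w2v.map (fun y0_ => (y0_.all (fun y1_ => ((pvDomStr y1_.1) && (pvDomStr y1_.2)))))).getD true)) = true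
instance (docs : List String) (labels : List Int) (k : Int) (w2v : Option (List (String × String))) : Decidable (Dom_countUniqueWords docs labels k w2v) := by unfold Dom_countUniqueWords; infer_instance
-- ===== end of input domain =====

-- B replaces A's single mutating pass filling k per-category sets (plus a final len() loop)
-- by k independent staged passes, one set comprehension and len per category; equivalence is
-- about the RETURN value (both Pythons also print the result, a side effect not modelled here).

-- shared trivia: Python truthiness of the w2v dict, and 'word in w2v' (key membership)
def pvTruthy (w2v : Option (List (String × String))) : Bool :=
  match w2v with
  | none => false
  | some d => !d.isEmpty

def pvHasKey (d : List (String × String)) (w : String) : Bool :=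
  d.any (fun p => p.1 == w)

-- ===== PORT A =====
-- body of A's innermost loop: one word, category index lab = labels[i] (Python list indexing)
-- ('uniqueWords[labels[i]]' appears three times, written out as pyGetD sets lab each time)
def pvAWord (w2v : Option (List (String × String))) (lab : Int)
    (sets : List (PySem.Set String)) (word : String) : List (PySem.Set String) :=
  if (if pvTruthy w2v
      then pvHasKey (w2v.getD []) word &&
        !(PySem.Set.contains (PySem.List.pyGetD sets lab PySem.Set.empty) word)
      else !(PySem.Set.contains (PySem.List.pyGetD sets lab PySem.Set.empty) word))
  then PySem.List.pySetD sets lab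
    (PySem.Set.add (PySem.List.pyGetD sets lab PySem.Set.empty) word)
  else sets

-- body of A's outer loop: one index i of range(len(docs))
def pvADoc (docs : List String) (labels : List Int) (w2v : Option (List (String × String)))
    (sets : List (PySem.Set String)) (i : Int) : List (PySem.Set String) :=
  (PySem.Str.split₀ (PySem.Str.strip (PySem.List.pyGetD docs i ""))).foldl
    (pvAWord w2v (PySem.List.pyGetD labels i 0)) sets

def countUniqueWords (docs : List String) (labels : List Int) (k : Int) (w2v : Option (List (String × String))) : List Int :=
  let uw := (PySem.List.pyRange 0 ((docs.length : Int)) 1).foldl (pvADoc docs labels w2v)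
              ((PySem.List.pyRange 0 k 1).map (fun _ => (PySem.Set.empty : PySem.Set String)))
  (PySem.List.pyRange 0 k 1).foldl
    (fun acc i => acc ++ [PySem.Set.len (PySem.List.pyGetD uw i PySem.Set.empty)]) []

-- ===== PORT B =====
-- Source B's inner filter: 'if not w2v or w in w2v' keeps the word in the comprehension
def pvBAdd (w2v : Option (List (String × String))) (s : PySem.Set String) (w : String) : PySem.Set String :=
  if !pvTruthy w2v || pvHasKey (w2v.getD []) w then PySem.Set.add s w else s

-- one (doc, lab) pair of the comprehension for category c: its words join the set iff lab == c
def pvBCat (w2v : Option (List (String × String))) (c : Int)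
    (s : PySem.Set String) (p : String × Int) : PySem.Set String :=
  if p.2 == c then (PySem.Str.split₀ (PySem.Str.strip p.1)).foldl (pvBAdd w2v) s else s

def countUniqueWords_alt (docs : List String) (labels : List Int) (k : Int) (w2v : Option (List (String × String))) : List Int :=
  (PySem.List.pyRange 0 k 1).map
    (fun c => PySem.Set.len ((docs.zip labels).foldl (pvBCat w2v c) PySem.Set.empty))

-- ===== PRECONDITION & SPEC =====
-- a word is dropped by the w2v filter iff w2v is truthy (a non-empty dict) and misses it;
-- A short-circuits and never touches labels[i] for a doc none of whose words survive
def pvFiltered (w2v : Option (List (String × String))) (word : String) : Bool :=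
  pvTruthy w2v && !(pvHasKey (w2v.getD []) word)

-- Pre_ is the documented domain of A (docstring: labels are len(docs) ints in 0...k-1),
-- asked only of documents with at least one word surviving the w2v filter (only for those
-- does A evaluate labels[i]): it excludes inputs where such a doc has no label or a label
-- outside [0, k) — there A raises IndexError, or, for a negative label in [-k, 0),
-- silently wraps it onto category k+label.
def Pre_countUniqueWords (docs : List String) (labels : List Int) (k : Int) (w2v : Option (List (String × String))) : Prop :=
  ∀ i : Nat, i < docs.length →
    (∃ w ∈ PySem.Str.split₀ (PySem.Str.strip (docs.getD i "")), pvFiltered w2v w = false) →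
    (i < labels.length ∧ 0 ≤ labels.getD i 0 ∧ labels.getD i 0 < k)
instance (docs : List String) (labels : List Int) (k : Int) (w2v : Option (List (String × String))) : Decidable (Pre_countUniqueWords docs labels k w2v) := by unfold Pre_countUniqueWords; infer_instance

def pvWitness_countUniqueWords : List String × List Int × Int × (Option (List (String × String))) :=
  (["a b a", " b c "], [0, 1], 2, none)

def Spec_countUniqueWords (docs : List String) (labels : List Int) (k : Int) (w2v : Option (List (String × String))) (out : List Int) : Prop := out = countUniqueWords_alt docs labels k w2v
instance (docs : List String) (labels : List Int) (k : Int) (w2v : Option (List (String × String))) (out : List Int) : Decidable (Spec_countUniqueWords docs labels k w2v out) := by unfold Spec_countUniqueWords; infer_instance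

-- ===== CLAIM (what is proved, stated in full; the proofs are below) =====
def Claim_equal_countUniqueWords : Prop := ∀ (docs : List String) (labels : List Int) (k : Int) (w2v : Option (List (String × String))), Dom_countUniqueWords docs labels k w2v → Pre_countUniqueWords docs labels k w2v → Spec_countUniqueWords docs labels k w2v (countUniqueWords docs labels k w2v)

-- ===== LEMMAS AND PROOFS =====

-- folding a do-nothing body is the identity (used for the blank tail of docs)
theorem pvFoldl_id {α β : Type} (l : List α) (x : β) : l.foldl (fun s (_ : α) => s) x = x := by
  induction l with
  | nil => rfl
  | cons a l ih => exact ih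

-- a word dropped by the w2v filter leaves A's state untouched
theorem pvAWord_filtered (w2v : Option (List (String × String))) (lab : Int) (word : String)
    (sets : List (PySem.Set String)) (hf : pvFiltered w2v word = true) :
    pvAWord w2v lab sets word = sets := by
  obtain ⟨ht, hk2⟩ : pvTruthy w2v = true ∧ pvHasKey (w2v.getD []) word = false := by
    simpa [pvFiltered] using hf
  unfold pvAWord
  simp only [ht, hk2, if_true, Bool.false_and, Bool.false_eq_true, if_false]

-- A's outer index loop is the same fold, taken over zip(docs, labels): the zipped prefix
-- is index-for-index the same work, and the unzipped tail of docs (if labels is shorter)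
-- is blank by hblank, so A does nothing there
theorem pvA_loop_zip (docs : List String) (labels : List Int) (w2v : Option (List (String × String)))
    (hblank : ∀ i : Nat, labels.length ≤ i → i < docs.length →
      ∀ w ∈ PySem.Str.split₀ (PySem.Str.strip (docs.getD i "")), pvFiltered w2v w = true)
    (init : List (PySem.Set String)) :
    (PySem.List.pyRange 0 ((docs.length : Int)) 1).foldl (pvADoc docs labels w2v) init =
      (docs.zip labels).foldl
        (fun sets p => (PySem.Str.split₀ (PySem.Str.strip p.1)).foldl (pvAWord w2v p.2) sets) init := by
  have hz : (docs.zip labels).length = min docs.length labels.length := List.length_zip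
  rw [PySem.List.pyRange_one_append 0 ((min docs.length labels.length : Nat) : Int)
        ((docs.length : Int)) (by positivity) (by omega), List.foldl_append]
  have htail : ∀ x, (PySem.List.pyRange ((min docs.length labels.length : Nat) : Int)
      ((docs.length : Int)) 1).foldl (pvADoc docs labels w2v) x = x := by
    intro x
    rw [PySem.List.foldl_congr_mem _ _ (fun s (_ : Int) => s) x ?_]
    · exact pvFoldl_id _ x
    · intro acc i hi
      rw [PySem.List.mem_pyRange_one] at hi
      obtain ⟨m, rfl⟩ : ∃ m : Nat, i = (m : Int) :=
        ⟨i.toNat, (Int.toNat_of_nonneg (le_trans (by positivity) hi.1)).symm⟩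
      have hm : m < docs.length := by exact_mod_cast hi.2
      have hml : labels.length ≤ m := by
        have := hi.1
        omega
      unfold pvADoc
      rw [PySem.List.pyGetD_natCast docs]
      rw [PySem.List.foldl_congr_mem _ _ (fun s (_ : String) => s) acc
        (fun a w hw => pvAWord_filtered w2v _ w a (hblank m hml hm w hw))]
      exact pvFoldl_id _ acc
  rw [htail]
  rw [← PySem.List.foldl_pyRange_zero_pyGetD' (docs.zip labels) ("", (0 : Int))
        (fun sets p => (PySem.Str.split₀ (PySem.Str.strip p.1)).foldl (pvAWord w2v p.2) sets) init,
      hz]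
  apply PySem.List.foldl_congr_mem
  intro acc x hx
  rw [PySem.List.mem_pyRange_one] at hx
  obtain ⟨m, rfl⟩ : ∃ m : Nat, x = (m : Int) := ⟨x.toNat, (Int.toNat_of_nonneg hx.1).symm⟩
  have hm : m < docs.length := by omega
  have hm2 : m < (docs.zip labels).length := by omega
  have hzd : (docs.zip labels).getD m ("", (0 : Int)) = (docs.getD m "", labels.getD m 0) := by
    rw [List.getD_eq_getElem _ _ hm2, List.getElem_zip,
        List.getD_eq_getElem _ _ hm, List.getD_eq_getElem _ _ (by omega)]
  unfold pvADoc
  simp only [PySem.List.pyGetD_natCast, hzd]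

theorem pvGetD_map_const {α β : Type} (xs : List α) (c : β) (j : Nat) :
    (xs.map (fun _ => c)).getD j c = c := by
  by_cases hj : j < xs.length
  · rw [List.getD_eq_getElem _ _ (by simpa using hj), List.getElem_map]
  · exact List.getD_eq_default _ _ (by simpa using Nat.le_of_not_lt hj)

theorem pvAWord_length (w2v : Option (List (String × String))) (lab : Int) (word : String)
    (sets : List (PySem.Set String)) : (pvAWord w2v lab sets word).length = sets.length := by
  unfold pvAWord
  split <;> split <;> simp [PySem.List.length_pySetD]

-- B's filter is the complement of pvFiltered
theorem pvBAdd_eq (w2v : Option (List (String × String))) (s : PySem.Set String) (w : String) :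
    pvBAdd w2v s w = if pvFiltered w2v w = true then s else PySem.Set.add s w := by
  unfold pvBAdd pvFiltered
  cases ht : pvTruthy w2v <;> cases hk : pvHasKey (w2v.getD []) w <;> simp

-- one word of A, observed at category index j
theorem pvAWord_getD (w2v : Option (List (String × String))) (lab : Int) (word : String)
    (sets : List (PySem.Set String)) (j : Nat) (hj : j < sets.length)
    (hlab : pvFiltered w2v word = false → 0 ≤ lab ∧ lab < (sets.length : Int)) :
    (pvAWord w2v lab sets word).getD j PySem.Set.empty =
      if pvFiltered w2v word = false ∧ lab = (j : Int)
      then PySem.Set.add (sets.getD j PySem.Set.empty) word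
      else sets.getD j PySem.Set.empty := by
  by_cases hfilt : pvFiltered w2v word = true
  · rw [pvAWord_filtered w2v lab word sets hfilt, if_neg (by simp [hfilt])]
  · have hf : pvFiltered w2v word = false := by simpa using hfilt
    obtain ⟨hl0, hlk⟩ := hlab hf
    obtain ⟨m, rfl⟩ : ∃ m : Nat, lab = (m : Int) := ⟨lab.toNat, (Int.toNat_of_nonneg hl0).symm⟩
    have hm : m < sets.length := by exact_mod_cast hlk
    unfold pvAWord
    rw [PySem.List.pyGetD_natCast, PySem.List.pySetD_natCast]
    have hhit : (if pvTruthy w2v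
        then pvHasKey (w2v.getD []) word && !(PySem.Set.contains (sets.getD m PySem.Set.empty) word)
        else !(PySem.Set.contains (sets.getD m PySem.Set.empty) word))
        = !(PySem.Set.contains (sets.getD m PySem.Set.empty) word) := by
      unfold pvFiltered at hf
      cases ht : pvTruthy w2v <;> cases hk : pvHasKey (w2v.getD []) word <;>
        simp [ht, hk] at hf ⊢
    rw [hhit]
    by_cases hc : PySem.Set.contains (sets.getD m PySem.Set.empty) word = true
    · have hadd : PySem.Set.add (sets.getD m PySem.Set.empty) word = sets.getD m PySem.Set.empty := by
        unfold PySem.Set.add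
        rw [if_pos hc]
      simp only [hc, Bool.not_true, Bool.false_eq_true, if_false]
      by_cases hje : ((m : Nat) : Int) = (j : Int)
      · have hmj : m = j := by exact_mod_cast hje
        subst hmj
        rw [if_pos ⟨hf, hje⟩, hadd]
      · rw [if_neg (by tauto)]
    · simp only [hc, Bool.not_false, if_true]
      by_cases hje : ((m : Nat) : Int) = (j : Int)
      · have hmj : m = j := by exact_mod_cast hje
        subst hmj
        rw [if_pos ⟨hf, hje⟩, List.getD_eq_getElem?_getD,
            List.getElem?_set_self (by omega), Option.getD_some]
      · have hmj : m ≠ j := fun h => hje (by exact_mod_cast h)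
        rw [if_neg (by tauto), List.getD_eq_getElem?_getD, List.getElem?_set_ne hmj,
            ← List.getD_eq_getElem?_getD]

theorem pvWords_length (w2v : Option (List (String × String))) (lab : Int) (ws : List String)
    (sets : List (PySem.Set String)) :
    (ws.foldl (pvAWord w2v lab) sets).length = sets.length := by
  induction ws generalizing sets with
  | nil => rfl
  | cons w ws ih => rw [List.foldl_cons, ih, pvAWord_length]

-- A's whole word loop for one doc, observed at category index j, is B's comprehension body
theorem pvWords_getD (w2v : Option (List (String × String))) (lab : Int) (ws : List String)
    (sets : List (PySem.Set String)) (j : Nat) (hj : j < sets.length)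
    (hall : ∀ w ∈ ws, pvFiltered w2v w = false → 0 ≤ lab ∧ lab < (sets.length : Int)) :
    (ws.foldl (pvAWord w2v lab) sets).getD j PySem.Set.empty =
      if lab = (j : Int) then ws.foldl (pvBAdd w2v) (sets.getD j PySem.Set.empty)
      else sets.getD j PySem.Set.empty := by
  induction ws generalizing sets with
  | nil => simp only [List.foldl_nil]; split <;> rfl
  | cons w ws ih =>
    have hj' : j < (pvAWord w2v lab sets w).length := by rw [pvAWord_length]; exact hj
    have hall' : ∀ w' ∈ ws, pvFiltered w2v w' = false →
        0 ≤ lab ∧ lab < ((pvAWord w2v lab sets w).length : Int) := by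
      intro w' hw' hfw'
      rw [pvAWord_length]
      exact hall w' (List.mem_cons_of_mem _ hw') hfw'
    rw [List.foldl_cons, ih _ hj' hall',
        pvAWord_getD w2v lab w sets j hj (hall w List.mem_cons_self)]
    by_cases hje : lab = (j : Int)
    · rw [if_pos hje, if_pos hje, List.foldl_cons, pvBAdd_eq]
      by_cases hfw : pvFiltered w2v w = true
      · rw [if_pos hfw, if_neg (by simp [hfw])]
      · rw [if_neg hfw, if_pos ⟨by simpa using hfw, hje⟩]
    · rw [if_neg hje, if_neg hje, if_neg (by tauto)]

-- A's zipped doc loop, observed at category index j, is B's set comprehension for category j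
theorem pvZip_getD (w2v : Option (List (String × String))) (k : Int) (zs : List (String × Int))
    (sets : List (PySem.Set String)) (j : Nat)
    (hlen : sets.length = k.toNat) (hj : j < k.toNat)
    (hz : ∀ p ∈ zs, (∃ w ∈ PySem.Str.split₀ (PySem.Str.strip p.1), pvFiltered w2v w = false) →
      0 ≤ p.2 ∧ p.2 < k) :
    (zs.foldl (fun sets p => (PySem.Str.split₀ (PySem.Str.strip p.1)).foldl (pvAWord w2v p.2) sets)
        sets).getD j PySem.Set.empty
      = zs.foldl (pvBCat w2v (j : Int)) (sets.getD j PySem.Set.empty) := by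
  induction zs generalizing sets with
  | nil => rfl
  | cons p zs ih =>
    have hlen' : ((PySem.Str.split₀ (PySem.Str.strip p.1)).foldl (pvAWord w2v p.2) sets).length
        = k.toNat := by rw [pvWords_length]; exact hlen
    have hall : ∀ w ∈ PySem.Str.split₀ (PySem.Str.strip p.1), pvFiltered w2v w = false →
        0 ≤ p.2 ∧ p.2 < (sets.length : Int) := by
      intro w hw hfw
      have h2 := hz p List.mem_cons_self ⟨w, hw, hfw⟩
      refine ⟨h2.1, ?_⟩
      rw [hlen]
      omega
    have hstep : ((PySem.Str.split₀ (PySem.Str.strip p.1)).foldl (pvAWord w2v p.2) sets).getD j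
        PySem.Set.empty = pvBCat w2v (j : Int) (sets.getD j PySem.Set.empty) p := by
      rw [pvWords_getD w2v p.2 _ sets j (by omega) hall]
      unfold pvBCat
      by_cases hje : p.2 = (j : Int)
      · rw [if_pos hje, if_pos (beq_iff_eq.mpr hje)]
      · rw [if_neg hje, if_neg (by simp [hje])]
    rw [List.foldl_cons, List.foldl_cons, ih _ hlen' (fun q hq => hz q (List.mem_cons_of_mem p hq)), hstep]

-- ===== VERDICT (by name: the statement is the Claim_ definition above) =====
theorem countUniqueWords_spec : Claim_equal_countUniqueWords := by
  intro docs labels k w2v _ hpre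
  unfold Spec_countUniqueWords countUniqueWords countUniqueWords_alt
  rw [pvA_loop_zip docs labels w2v (fun i h1 h2 w hw => by
    by_contra hne
    exact absurd (hpre i h2 ⟨w, hw, by simpa using hne⟩).1 (by omega))]
  rw [PySem.List.foldl_append_singleton_eq_map, List.nil_append]
  apply List.map_congr_left
  intro i hi
  rw [PySem.List.mem_pyRange_one] at hi
  obtain ⟨m, rfl⟩ : ∃ m : Nat, i = (m : Int) := ⟨i.toNat, (Int.toNat_of_nonneg hi.1).symm⟩
  have hm : m < k.toNat := by omega
  rw [PySem.List.pyGetD_natCast]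
  congr 1
  have hinitlen : ((PySem.List.pyRange 0 k 1).map
      (fun _ => (PySem.Set.empty : PySem.Set String))).length = k.toNat := by
    simp [PySem.List.length_pyRange_one]
  rw [pvZip_getD w2v k _ _ m hinitlen hm ?hz, pvGetD_map_const]
  case hz =>
    rintro p hp hw
    obtain ⟨idx, hidx, rfl⟩ := List.mem_iff_getElem.mp hp
    have hd : idx < docs.length := by rw [List.length_zip] at hidx; omega
    have hlab : idx < labels.length := by rw [List.length_zip] at hidx; omega
    rw [List.getElem_zip] at hw ⊢
    have hp2 := hpre idx hd (by rw [List.getD_eq_getElem _ _ hd]; exact hw)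
    rw [List.getD_eq_getElem _ _ hlab] at hp2
    exact ⟨hp2.2.1, hp2.2.2⟩
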